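-- pv_equiv track=rewrite | github.com/sunilsch/Advent-Of-Code | 2019/day1.py | calc
-- ===== SOURCE A (Python) =====
-- def calc(inp):
--     s = 0
--     while True:
--         inp = (inp//3)-2
--         if inp >= 0:
--             s += inp
--         else:
--             break
--     return s
-- ===== SOURCE B (Python) =====
-- def calc(inp):
--     f = (inp // 3) - 2
--     if f < 0:
--         return 0
--     return f + calc(f)
-- ===== Notes on version B (the rewrite author's own statement) =====
-- stated objective: simpler
-- what changed: Replaces the while-True loop with accumulator and break by the direct self-similar recursion: compute one fuel step and, while it is nonnegative, add it to a recursive call on it.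
import Mathlib
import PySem

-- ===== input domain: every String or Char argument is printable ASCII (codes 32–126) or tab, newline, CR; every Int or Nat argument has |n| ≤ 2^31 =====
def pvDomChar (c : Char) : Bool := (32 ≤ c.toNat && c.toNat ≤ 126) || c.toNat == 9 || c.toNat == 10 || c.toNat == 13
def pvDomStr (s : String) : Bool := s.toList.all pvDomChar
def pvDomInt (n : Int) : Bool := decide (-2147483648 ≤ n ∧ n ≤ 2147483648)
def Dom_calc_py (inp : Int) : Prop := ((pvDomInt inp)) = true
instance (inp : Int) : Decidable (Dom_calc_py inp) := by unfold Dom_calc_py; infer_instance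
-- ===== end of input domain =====

-- B replaces A's while-loop with accumulator and break by the direct recursion
-- f = inp//3 - 2; 0 if f < 0 else f + calc(f)  (simpler decomposition, same cost).

-- termination helper (used by both ports' decreasing_by)
theorem pvStep_lt (inp : Int) (h : 0 ≤ PySem.Int.floordiv inp 3 - 2) :
    (PySem.Int.floordiv inp 3 - 2).toNat < inp.toNat := by
  have h3 : PySem.Int.floordiv inp 3 = inp / 3 := by
    simp only [PySem.Int.floordiv]
    rw [Int.fdiv_eq_ediv]; simp
  rw [h3] at h ⊢
  omega

-- ===== PORT A =====
-- A's while-True loop with accumulator s; the loop body mutating inp becomes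
-- structural recursion on inp with the same accumulator.
def calcLoop (inp s : Int) : Int :=
  let inp' := PySem.Int.floordiv inp 3 - 2
  if h : inp' ≥ 0 then calcLoop inp' (s + inp') else s
termination_by inp.toNat
decreasing_by exact pvStep_lt inp h

def calc_py (inp : Int) : Int := calcLoop inp 0

-- ===== PORT B =====
def calc_py_alt (inp : Int) : Int :=
  let f := PySem.Int.floordiv inp 3 - 2
  if h : f < 0 then 0 else f + calc_py_alt f
termination_by inp.toNat
decreasing_by exact pvStep_lt inp (by omega)

-- ===== PRECONDITION & SPEC =====
def Spec_calc_py (inp : Int) (out : Int) : Prop := out = calc_py_alt inp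
instance (inp : Int) (out : Int) : Decidable (Spec_calc_py inp out) := by unfold Spec_calc_py; infer_instance

-- ===== CLAIM (what is proved, stated in full; the proofs are below) =====
def Claim_equal_calc_py : Prop := ∀ (inp : Int), Dom_calc_py inp → Spec_calc_py inp (calc_py inp)

-- ===== LEMMAS AND PROOFS =====
theorem calcLoop_eq_alt (inp s : Int) : calcLoop inp s = s + calc_py_alt inp := by
  induction hn : inp.toNat using Nat.strong_induction_on generalizing inp s with
  | _ n ih =>
    rw [calcLoop, calc_py_alt]
    by_cases h : PySem.Int.floordiv inp 3 - 2 ≥ 0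
    · have hlt : (PySem.Int.floordiv inp 3 - 2).toNat < n := hn ▸ pvStep_lt inp h
      simp only [h, dite_true, show ¬ (PySem.Int.floordiv inp 3 - 2 < 0) by omega, dite_false]
      rw [ih _ hlt _ _ rfl]
      ring
    · rw [dif_neg h, dif_pos (show PySem.Int.floordiv inp 3 - 2 < 0 by omega)]
      ring

-- ===== VERDICT (by name: the statement is the Claim_ definition above) =====
theorem calc_py_spec : Claim_equal_calc_py := by
  intro inp _
  unfold Spec_calc_py calc_py
  rw [calcLoop_eq_alt]
  ring
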